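-- pv_equiv track=rewrite | github.com/voaitmann1/python1 | AP/QR/MyPolynomeEqsLib.py | polynomeEqGenerator
-- ===== SOURCE A (Python) =====
-- def polynomeEqGenerator(R):
--     Ord=len(R)
--     c=[]
--     for i in range(Ord+1):
--         cl=[]
--         for j in range(Ord+1):
--             cl.append(0)
--         c.append(cl)
--     for n in range(0, Ord+1):
--         for i in range(0, Ord+1):
--             if n==0 or i>n:
--                 c[n][i]=0
--             else:
--                 if n==2:
--                     if i==2:
--                         c[n][i]=1
--                     else:
--                         if i>0:
--                             c[n][i]=-(R[1-1]+R[2-1])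
--                         else:
--                             c[n][i]=1
--                             for j in range(1, n+1):
--                                 c[n][i]*=R[j-1]
--                 else:
--                     if i==n:
--                         c[n][i]=c[n-1][i-1]
--                     else:
--                         if i==0:
--                             c[n][i]=-R[n-1]*c[n-1][i]
--                         else:
--                             c[n][i]=c[n-1][i-1]-R[n-1]*c[n-1][i]
--     #
--     C=[]
--     for i in range(Ord+1):
--         C.append(c[Ord][i])
--     return C
-- ===== SOURCE B (Python) =====
-- def _conv(P, Q):
--     out = [0] * (len(P) + len(Q) - 1)
--     for i in range(len(P)):
--         for j in range(len(Q)):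
--             out[i + j] += P[i] * Q[j]
--     return out
--
-- def _build(R):
--     if len(R) == 0:
--         return [1]
--     if len(R) == 1:
--         return [-R[0], 1]
--     m = len(R) // 2
--     return _conv(_build(R[:m]), _build(R[m:]))
--
-- def polynomeEqGenerator(R):
--     return _build(R)
-- ===== Notes on version B (the rewrite author's own statement) =====
-- stated objective: alternative
-- what changed: Replaces the row-by-row (n+1)x(n+1) table recurrence with a divide-and-conquer scheme: split the root list in half, recursively build each half's coefficient list, and combine the halves with an explicit convolution product.
-- intended difference: For fewer than two roots A returns an all-zero coefficient list of length len(R)+1 because its table rows 0 and 1 are never filled in, while B returns the intended expansion: the constant polynomial one for no roots and the monic linear polynomial whose constant term is the negated root for one root. — e.g. on polynomeEqGenerator([]): A returns [0], B returns [1]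
import Mathlib
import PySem

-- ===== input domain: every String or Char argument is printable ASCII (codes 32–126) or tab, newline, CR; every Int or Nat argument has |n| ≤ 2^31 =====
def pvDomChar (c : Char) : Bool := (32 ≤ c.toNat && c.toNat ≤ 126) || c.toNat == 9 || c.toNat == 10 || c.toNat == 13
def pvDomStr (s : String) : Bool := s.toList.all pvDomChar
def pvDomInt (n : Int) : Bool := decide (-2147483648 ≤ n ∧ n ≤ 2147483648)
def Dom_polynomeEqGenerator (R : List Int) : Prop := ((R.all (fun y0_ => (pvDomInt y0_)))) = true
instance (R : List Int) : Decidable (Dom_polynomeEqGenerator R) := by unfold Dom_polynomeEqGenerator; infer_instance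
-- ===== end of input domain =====

-- B replaces A's row-by-row (n+1)x(n+1) table recurrence by divide and conquer: split the
-- root list in half, build each half's coefficient list recursively, combine by convolution.

-- ===== PORT A =====
-- c[n][i] read (in-range in A's uses; default 0 only for uniformity of the helper)
def pvG2 (c : List (List Int)) (n i : Nat) : Int := (c.getD n []).getD i 0
-- c[n][i] = v assignment
def pvS2 (c : List (List Int)) (n i : Nat) (v : Int) : List (List Int) :=
  c.set n ((c.getD n []).set i v)

-- the body of the inner "for i in range(0, Ord+1)" loop (one cell assignment)
def pvInner (R : List Int) (n : Nat) (c : List (List Int)) (i : Nat) : List (List Int) :=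
  if n = 0 ∨ i > n then pvS2 c n i 0
  else if n = 2 then
    (if i = 2 then pvS2 c n i 1
     else if i > 0 then pvS2 c n i (-(R.getD (1-1) 0 + R.getD (2-1) 0))
     else
       let c' := pvS2 c n i 1
       (List.range' 1 n).foldl (fun c j => pvS2 c n i (pvG2 c n i * R.getD (j-1) 0)) c')
  else
    (if i = n then pvS2 c n i (pvG2 c (n-1) (i-1))
     else if i = 0 then pvS2 c n i (-(R.getD (n-1) 0) * pvG2 c (n-1) i)
     else pvS2 c n i (pvG2 c (n-1) (i-1) - R.getD (n-1) 0 * pvG2 c (n-1) i))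

-- the body of the outer "for n in range(0, Ord+1)" loop
def pvOuter (R : List Int) (c : List (List Int)) (n : Nat) : List (List Int) :=
  (List.range (R.length+1)).foldl (pvInner R n) c

def polynomeEqGenerator (R : List Int) : List Int :=
  let Ord := R.length
  let c0 : List (List Int) :=
    (List.range (Ord+1)).foldl (fun c _ =>
      c ++ [(List.range (Ord+1)).foldl (fun cl _ => cl ++ [(0:Int)]) []]) []
  let c1 := (List.range (Ord+1)).foldl (pvOuter R) c0
  (List.range (Ord+1)).foldl (fun C i => C ++ [pvG2 c1 Ord i]) []

-- ===== PORT B =====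
-- _conv: out = [0]*(len(P)+len(Q)-1); nested loops doing out[i+j] += P[i]*Q[j]
def pvConv (P Q : List Int) : List Int :=
  (List.range P.length).foldl (fun out i =>
    (List.range Q.length).foldl (fun out j =>
      out.set (i+j) (out.getD (i+j) 0 + P.getD i 0 * Q.getD j 0)) out)
    (List.replicate (P.length + Q.length - 1) 0)

-- _build, with a fuel bound (fuel ≥ len R suffices; the fuel-0 branch is unreachable then):
-- R[:m] / R[m:] with 0 ≤ m ≤ len(R) are exactly take/drop
def pvBuildF (fuel : Nat) (R : List Int) : List Int :=
  if R.length = 0 then [1]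
  else if R.length = 1 then [-(R.getD 0 0), 1]
  else match fuel with
    | 0 => []
    | f+1 => pvConv (pvBuildF f (R.take (R.length / 2))) (pvBuildF f (R.drop (R.length / 2)))

def polynomeEqGenerator_alt (R : List Int) : List Int := pvBuildF R.length R

-- ===== PRECONDITION & SPEC =====
-- For fewer than two roots A returns an all-zero coefficient list of length len(R)+1,
-- because its table rows 0 and 1 are never filled in, while B returns the intended
-- expansion: the constant polynomial one for no roots and the monic linear polynomial
-- whose constant term is the negated root for one root.
def D_polynomeEqGenerator (R : List Int) : Prop := R.length < 2
instance (R : List Int) : Decidable (D_polynomeEqGenerator R) := by unfold D_polynomeEqGenerator; infer_instance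

def Spec_polynomeEqGenerator (R : List Int) (out : List Int) : Prop :=
  ¬ D_polynomeEqGenerator R → out = polynomeEqGenerator_alt R
instance (R : List Int) (out : List Int) : Decidable (Spec_polynomeEqGenerator R out) := by unfold Spec_polynomeEqGenerator; infer_instance

def pvDiffWitness_polynomeEqGenerator : List Int := []
def pvDiffWitnessOut_polynomeEqGenerator : (List Int) × (List Int) := ([0], [1])

-- ===== CLAIM (what is proved, stated in full; the proofs are below) =====
def Claim_unchanged_polynomeEqGenerator : Prop := ∀ (R : List Int), Dom_polynomeEqGenerator R → Spec_polynomeEqGenerator R (polynomeEqGenerator R)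
def Claim_changed_polynomeEqGenerator : Prop := Dom_polynomeEqGenerator (pvDiffWitness_polynomeEqGenerator) ∧ D_polynomeEqGenerator (pvDiffWitness_polynomeEqGenerator) ∧ polynomeEqGenerator (pvDiffWitness_polynomeEqGenerator) = pvDiffWitnessOut_polynomeEqGenerator.1 ∧ polynomeEqGenerator_alt (pvDiffWitness_polynomeEqGenerator) = pvDiffWitnessOut_polynomeEqGenerator.2 ∧ pvDiffWitnessOut_polynomeEqGenerator.1 ≠ pvDiffWitnessOut_polynomeEqGenerator.2
def Claim_exact_polynomeEqGenerator : Prop := ∀ (R : List Int), Dom_polynomeEqGenerator R → D_polynomeEqGenerator R → polynomeEqGenerator R ≠ polynomeEqGenerator_alt R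

-- ===== LEMMAS AND PROOFS =====

-- proof-side helper: one multiplication of a coefficient list by (x - r)
def pvStep (r : Int) (C : List Int) : List Int :=
  [-r * C.getD 0 0] ++ (List.range' 1 (C.length - 1)).map (fun i => C.getD (i-1) 0 - r * C.getD i 0) ++ [1]

-- polynomial of the first k roots, built factor by factor
def polyk (R : List Int) (k : Nat) : List Int :=
  (R.take k).foldl (fun C r => pvStep r C) [1]

-- the contents A's table row n holds once filled
def rowSpec (R : List Int) (n : Nat) : List Int :=
  if n < 2 then List.replicate (R.length+1) 0
  else polyk R n ++ List.replicate (R.length - n) 0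

-- A's table after the outer loop has processed rows 0..m-1
def tableMap (R : List Int) (m : Nat) : List (List Int) :=
  (List.range (R.length+1)).map
    (fun k => if k < m then rowSpec R k else List.replicate (R.length+1) 0)
theorem pvStep_length (r : Int) (C : List Int) (h : C ≠ []) :
    (pvStep r C).length = C.length + 1 := by
  have := List.length_pos_iff.mpr h
  simp [pvStep]; omega

theorem pvStep_getD_zero (r : Int) (C : List Int) :
    (pvStep r C).getD 0 0 = -r * C.getD 0 0 := rfl

theorem pvStep_getD_mid (r : Int) (C : List Int) (i : Nat) (h1 : 1 ≤ i) (h2 : i < C.length) :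
    (pvStep r C).getD i 0 = C.getD (i-1) 0 - r * C.getD i 0 := by
  obtain ⟨i', rfl⟩ : ∃ i', i = i' + 1 := ⟨i - 1, by omega⟩
  have hlt : i' < ((List.range' 1 (C.length - 1)).map
      (fun i => C.getD (i-1) 0 - r * C.getD i 0)).length := by simp; omega
  simp only [pvStep, List.singleton_append]
  rw [List.cons_append, List.getD_cons_succ, List.getD_append _ _ _ _ hlt, List.getD_eq_getElem _ _ hlt,
    List.getElem_map]
  simp [List.getElem_range', Nat.add_comm 1 i']

theorem pvStep_getD_top (r : Int) (C : List Int) (h : C ≠ []) :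
    (pvStep r C).getD C.length 0 = 1 := by
  have hl := List.length_pos_iff.mpr h
  obtain ⟨m, hm⟩ : ∃ m, C.length = m + 1 := ⟨C.length - 1, by omega⟩
  rw [hm]
  simp only [pvStep, List.singleton_append]
  rw [List.cons_append, List.getD_cons_succ, List.getD_eq_getElem?_getD]
  rw [List.getElem?_append_right (by simp; omega)]
  simp [hm]

theorem polyk_succ (R : List Int) (n : Nat) (h : n < R.length) :
    polyk R (n+1) = pvStep (R.getD n 0) (polyk R n) := by
  unfold polyk
  rw [List.take_add_one, List.getElem?_eq_getElem h]
  simp only [Option.toList_some, List.foldl_append, List.foldl_cons, List.foldl_nil]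
  rw [List.getD_eq_getElem _ _ h]

theorem polyk_length (R : List Int) (n : Nat) (h : n ≤ R.length) :
    (polyk R n).length = n + 1 := by
  induction n with
  | zero => rfl
  | succ m ih =>
    rw [polyk_succ R m (by omega), pvStep_length]
    · rw [ih (by omega)]
    · have := ih (by omega)
      intro he; rw [he] at this; simp at this

theorem polyk_ne_nil (R : List Int) (n : Nat) (h : n ≤ R.length) : polyk R n ≠ [] := by
  have := polyk_length R n h
  intro he; rw [he] at this; simp at this

theorem polyk_getD_self (R : List Int) (n : Nat) (h : n ≤ R.length) :
    (polyk R n).getD n 0 = 1 := by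
  induction n with
  | zero => rfl
  | succ m ih =>
    rw [polyk_succ R m (by omega)]
    have hl := polyk_length R m (by omega)
    have := pvStep_getD_top (R.getD m 0) (polyk R m) (polyk_ne_nil R m (by omega))
    rwa [hl] at this

theorem polyk_two (R : List Int) (h : 2 ≤ R.length) :
    polyk R 2 = [R.getD 0 0 * R.getD 1 0, -(R.getD 0 0 + R.getD 1 0), 1] := by
  match R, h with
  | r0 :: r1 :: rest, _ =>
    show polyk (r0 :: r1 :: rest) 2 = _
    simp [polyk, pvStep]
    constructor
    · ring
    · ring

-- row/table helper objects
def prow (R : List Int) (n j : Nat) : List Int :=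
  (rowSpec R n).take j ++ List.replicate (R.length+1-j) 0

def pfun (R : List Int) (n j : Nat) (k : Nat) : List Int :=
  if k < n then rowSpec R k else if k = n then prow R n j else List.replicate (R.length+1) 0

def ptbl (R : List Int) (n j : Nat) : List (List Int) :=
  (List.range (R.length+1)).map (pfun R n j)

theorem getD_replicate_zero (k i : Nat) : (List.replicate k (0:Int)).getD i 0 = 0 := by
  rw [List.getD_eq_getElem?_getD, List.getElem?_replicate]
  split <;> rfl

theorem rowSpec_length (R : List Int) (n : Nat) (hn : n ≤ R.length) :
    (rowSpec R n).length = R.length + 1 := by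
  unfold rowSpec
  split
  · simp
  · simp [polyk_length R n hn]; omega

theorem rowSpec_getD_lt2 (R : List Int) (n i : Nat) (h : n < 2) :
    (rowSpec R n).getD i 0 = 0 := by
  unfold rowSpec; rw [if_pos h]; exact getD_replicate_zero _ _

theorem rowSpec_getD_le (R : List Int) (n i : Nat) (h2 : 2 ≤ n) (hn : n ≤ R.length)
    (hi : i ≤ n) : (rowSpec R n).getD i 0 = (polyk R n).getD i 0 := by
  unfold rowSpec; rw [if_neg (by omega)]
  exact List.getD_append _ _ _ _ (by rw [polyk_length R n hn]; omega)

theorem rowSpec_getD_gt (R : List Int) (n i : Nat) (h2 : 2 ≤ n) (hn : n ≤ R.length)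
    (hi : n < i) : (rowSpec R n).getD i 0 = 0 := by
  unfold rowSpec
  rw [if_neg (by omega), List.getD_eq_getElem?_getD,
    List.getElem?_append_right (by rw [polyk_length R n hn]; omega)]
  rw [← List.getD_eq_getElem?_getD]
  exact getD_replicate_zero _ _

theorem pvG2_map_range (N k i : Nat) (f : Nat → List Int) (h : k < N) :
    pvG2 ((List.range N).map f) k i = (f k).getD i 0 := by
  unfold pvG2
  rw [PySem.List.getD_map_range f N k [] h]

theorem pvS2_map_range (N k i : Nat) (v : Int) (f : Nat → List Int) (h : k < N) :
    pvS2 ((List.range N).map f) k i v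
      = (List.range N).map (fun m => if m = k then (f k).set i v else f m) := by
  unfold pvS2
  rw [PySem.List.getD_map_range f N k [] h]
  apply List.ext_getElem (by simp)
  intro j h1 h2
  simp only [List.length_map, List.length_range] at h2
  rw [List.getElem_set]
  by_cases hjk : j = k
  · subst hjk; simp
  · simp [hjk, Ne.symm hjk]

theorem getD_set_self (l : List Int) (i : Nat) (v : Int) (h : i < l.length) :
    (l.set i v).getD i 0 = v := by
  rw [List.getD_eq_getElem _ _ (by simpa using h), List.getElem_set]; simp

theorem pvS2_pvS2 (c : List (List Int)) (n i : Nat) (v w : Int) :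
    pvS2 (pvS2 c n i v) n i w = pvS2 c n i w := by
  unfold pvS2
  by_cases h : n < c.length
  · have hrow : (c.set n ((c.getD n []).set i v)).getD n [] = (c.getD n []).set i v := by
      rw [List.getD_eq_getElem _ _ (by simpa using h), List.getElem_set]; simp
    rw [hrow, List.set_set, List.set_set]
  · have h1 : c.set n ((c.getD n []).set i v) = c := List.set_eq_of_length_le (by omega)
    rw [h1]

theorem pvG2_pvS2_self (c : List (List Int)) (n i : Nat) (v : Int)
    (hn : n < c.length) (hi : i < (c.getD n []).length) :
    pvG2 (pvS2 c n i v) n i = v := by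
  unfold pvG2 pvS2
  have hrow : (c.set n ((c.getD n []).set i v)).getD n [] = (c.getD n []).set i v := by
    rw [List.getD_eq_getElem _ _ (by simpa using hn), List.getElem_set]; simp
  rw [hrow]
  exact getD_set_self _ _ _ hi

theorem prow_length (R : List Int) (n j : Nat) (hn : n ≤ R.length) (hj : j ≤ R.length + 1) :
    (prow R n j).length = R.length + 1 := by
  simp [prow, List.length_take, rowSpec_length R n hn]; omega

theorem prow_set (R : List Int) (n j : Nat) (v : Int) (hn : n ≤ R.length) (hj : j ≤ R.length) :
    (prow R n j).set j v = (rowSpec R n).take j ++ v :: List.replicate (R.length - j) 0 := by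
  unfold prow
  have hlen : ((rowSpec R n).take j).length = j := by
    simp [List.length_take, rowSpec_length R n hn]; omega
  rw [show R.length + 1 - j = (R.length - j) + 1 by omega, List.replicate_succ]
  rw [List.set_append_right _ _ (by omega), hlen]
  simp

theorem prow_succ_eq (R : List Int) (n j : Nat) (hn : n ≤ R.length) (hj : j ≤ R.length) :
    prow R n (j+1)
      = (rowSpec R n).take j ++ (rowSpec R n).getD j 0 :: List.replicate (R.length - j) 0 := by
  unfold prow
  have hjl : j < (rowSpec R n).length := by rw [rowSpec_length R n hn]; omega
  rw [List.take_add_one, List.getElem?_eq_getElem hjl, List.getD_eq_getElem _ _ hjl,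
    show R.length + 1 - (j+1) = R.length - j by omega]
  simp only [Option.toList_some, List.append_assoc, List.singleton_append]

theorem set_form (R : List Int) (n j : Nat) (hn : n ≤ R.length) (hj : j ≤ R.length) :
    (List.range (R.length+1)).map
      (fun m => if m = n then (prow R n j).set j ((rowSpec R n).getD j 0) else pfun R n j m)
      = ptbl R n (j+1) := by
  unfold ptbl
  apply List.map_congr_left
  intro k hk
  by_cases hkn : k = n
  · subst hkn
    rw [if_pos rfl, prow_set R k j _ hn hj, ← prow_succ_eq R k j hn hj]
    simp [pfun]
  · rw [if_neg hkn]
    simp [pfun, hkn]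

theorem pvS2_ptbl (R : List Int) (n j : Nat) (v : Int) (hn : n ≤ R.length) (hj : j ≤ R.length)
    (hv : v = (rowSpec R n).getD j 0) :
    pvS2 (ptbl R n j) n j v = ptbl R n (j+1) := by
  unfold ptbl
  rw [pvS2_map_range _ _ _ _ _ (by omega)]
  have hp : pfun R n j n = prow R n j := by simp [pfun]
  subst hv
  simp only [hp]
  exact set_form R n j hn hj

theorem pvG2_ptbl (R : List Int) (n j k i : Nat) (hk : k < n) (hn : n ≤ R.length) :
    pvG2 (ptbl R n j) k i = (rowSpec R k).getD i 0 := by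
  unfold ptbl
  rw [pvG2_map_range _ _ _ _ (by omega)]
  simp [pfun, hk]

theorem pvInner_step (R : List Int) (n j : Nat) (hn : n ≤ R.length) (hj : j ≤ R.length) :
    pvInner R n (ptbl R n j) j = ptbl R n (j+1) := by
  unfold pvInner
  by_cases h0 : n = 0 ∨ j > n
  · rw [if_pos h0]
    apply pvS2_ptbl R n j 0 hn hj
    rcases h0 with h0 | h0
    · subst h0; exact (rowSpec_getD_lt2 R 0 j (by omega)).symm
    · rcases Nat.lt_or_ge n 2 with h | h
      · exact (rowSpec_getD_lt2 R n j h).symm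
      · exact (rowSpec_getD_gt R n j h hn h0).symm
  · rw [if_neg h0]
    push_neg at h0
    obtain ⟨hn0, hjn⟩ := h0
    by_cases h2 : n = 2
    · subst h2
      rw [if_pos rfl]
      interval_cases j
      · -- j = 0 : the in-place product subloop
        rw [if_neg (by omega), if_neg (by omega)]
        have hT2 : 2 < (ptbl R 2 0).length := by simp [ptbl]; omega
        have hrow : (ptbl R 2 0).getD 2 [] = prow R 2 0 := by
          unfold ptbl
          rw [PySem.List.getD_map_range _ _ _ _ (by omega)]
          simp [pfun]
        have hrl : 0 < ((ptbl R 2 0).getD 2 []).length := by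
          rw [hrow, prow_length R 2 0 hn (by omega)]; omega
        have hg1 : pvG2 (pvS2 (ptbl R 2 0) 2 0 1) 2 0 = 1 :=
          pvG2_pvS2_self _ _ _ _ hT2 hrl
        show (List.range' 1 2).foldl
            (fun c j => pvS2 c 2 0 (pvG2 c 2 0 * R.getD (j-1) 0))
            (pvS2 (ptbl R 2 0) 2 0 1) = ptbl R 2 (0+1)
        rw [show List.range' 1 2 = [1, 2] by decide]
        simp only [List.foldl_cons, List.foldl_nil]
        rw [hg1, pvS2_pvS2]
        have hg2 : pvG2 (pvS2 (pvS2 (ptbl R 2 0) 2 0 1) 2 0 (1 * R.getD (1-1) 0)) 2 0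
            = 1 * R.getD (1-1) 0 := by
          rw [pvS2_pvS2]; exact pvG2_pvS2_self _ _ _ _ hT2 hrl
        rw [hg2, pvS2_pvS2]
        apply pvS2_ptbl R 2 0 _ hn (by omega)
        rw [rowSpec_getD_le R 2 0 (by omega) hn (by omega), polyk_two R hn]
        norm_num
      · -- j = 1
        rw [if_neg (by omega), if_pos (by omega)]
        apply pvS2_ptbl R 2 1 _ hn (by omega)
        rw [rowSpec_getD_le R 2 1 (by omega) hn (by omega), polyk_two R hn]
        rfl
      · -- j = 2
        rw [if_pos rfl]
        apply pvS2_ptbl R 2 2 _ hn (by omega)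
        rw [rowSpec_getD_le R 2 2 (by omega) hn (by omega), polyk_two R hn]
        rfl
    · rw [if_neg h2]
      obtain ⟨m, rfl⟩ : ∃ m, n = m + 1 := ⟨n-1, by omega⟩
      simp only [Nat.add_sub_cancel]
      by_cases hje : j = m + 1
      · rw [if_pos hje]; subst hje
        simp only [Nat.add_sub_cancel]
        apply pvS2_ptbl R (m+1) (m+1) _ hn (by omega)
        rw [pvG2_ptbl R (m+1) (m+1) m m (by omega) hn]
        rcases Nat.eq_zero_or_pos m with hm | hm
        · subst hm
          rw [rowSpec_getD_lt2 R 0 0 (by omega), rowSpec_getD_lt2 R 1 1 (by omega)]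
        · have hm2 : 2 ≤ m := by omega
          rw [rowSpec_getD_le R m m hm2 (by omega) (le_refl m),
            polyk_getD_self R m (by omega),
            rowSpec_getD_le R (m+1) (m+1) (by omega) hn (le_refl _),
            polyk_getD_self R (m+1) hn]
      · rw [if_neg hje]
        by_cases hj0 : j = 0
        · rw [if_pos hj0]; subst hj0
          apply pvS2_ptbl R (m+1) 0 _ hn (by omega)
          rw [pvG2_ptbl R (m+1) 0 m 0 (by omega) hn]
          rcases Nat.eq_zero_or_pos m with hm | hm
          · subst hm
            rw [rowSpec_getD_lt2 R 0 0 (by omega), rowSpec_getD_lt2 R 1 0 (by omega)]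
            ring
          · have hm2 : 2 ≤ m := by omega
            rw [rowSpec_getD_le R m 0 hm2 (by omega) (by omega),
              rowSpec_getD_le R (m+1) 0 (by omega) hn (by omega),
              polyk_succ R m (by omega), pvStep_getD_zero]
        · rw [if_neg hj0]
          have hm2 : 2 ≤ m := by omega
          apply pvS2_ptbl R (m+1) j _ hn hj
          rw [pvG2_ptbl R (m+1) j m (j-1) (by omega) hn,
            pvG2_ptbl R (m+1) j m j (by omega) hn,
            rowSpec_getD_le R m (j-1) hm2 (by omega) (by omega),
            rowSpec_getD_le R m j hm2 (by omega) (by omega),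
            rowSpec_getD_le R (m+1) j (by omega) hn (by omega),
            polyk_succ R m (by omega),
            pvStep_getD_mid _ _ j (by omega) (by rw [polyk_length R m (by omega)]; omega)]

theorem ptbl_zero (R : List Int) (n : Nat) : ptbl R n 0 = tableMap R n := by
  unfold ptbl tableMap
  apply List.map_congr_left
  intro k _
  by_cases h1 : k < n
  · simp [pfun, h1]
  · by_cases h2 : k = n
    · simp [pfun, h2, prow]
    · simp [pfun, h1, h2]

theorem ptbl_top (R : List Int) (n : Nat) (hn : n ≤ R.length) :
    ptbl R n (R.length + 1) = tableMap R (n+1) := by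
  unfold ptbl tableMap
  apply List.map_congr_left
  intro k _
  by_cases h1 : k < n
  · simp [pfun, h1, show k < n + 1 by omega]
  · by_cases h2 : k = n
    · subst h2
      simp [pfun, prow, List.take_of_length_le (le_of_eq (rowSpec_length R k hn))]
    · simp [pfun, h1, h2, show ¬ k < n + 1 by omega]

theorem inner_loop (R : List Int) (n : Nat) (hn : n ≤ R.length) :
    ∀ j, j ≤ R.length + 1 →
      (List.range j).foldl (pvInner R n) (ptbl R n 0) = ptbl R n j := by
  intro j
  induction j with
  | zero => intro _; rfl
  | succ m ih =>
    intro h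
    rw [List.range_succ, List.foldl_append, ih (by omega)]
    simp only [List.foldl_cons, List.foldl_nil]
    exact pvInner_step R n m hn (by omega)

theorem outer_step (R : List Int) (n : Nat) (hn : n ≤ R.length) :
    pvOuter R (tableMap R n) n = tableMap R (n+1) := by
  unfold pvOuter
  rw [← ptbl_zero R n, inner_loop R n hn (R.length+1) (le_refl _), ptbl_top R n hn]

theorem outer_loop (R : List Int) :
    ∀ m, m ≤ R.length + 1 →
      (List.range m).foldl (pvOuter R) (tableMap R 0) = tableMap R m := by
  intro m
  induction m with
  | zero => intro _; rfl
  | succ k ih =>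
    intro h
    rw [List.range_succ, List.foldl_append, ih (by omega)]
    simp only [List.foldl_cons, List.foldl_nil]
    exact outer_step R k (by omega)

theorem c0_eq (R : List Int) :
    (List.range (R.length+1)).foldl (fun c _ =>
      c ++ [(List.range (R.length+1)).foldl (fun cl _ => cl ++ [(0:Int)]) []]) []
      = tableMap R 0 := by
  have h1 : (List.range (R.length+1)).foldl (fun cl _ => cl ++ [(0:Int)]) []
      = List.replicate (R.length+1) 0 := by
    rw [PySem.List.foldl_append_singleton_eq_map (fun _ => (0:Int))]
    simp [List.map_const']
  rw [h1, PySem.List.foldl_append_singleton_eq_map (fun _ => List.replicate (R.length+1) (0:Int))]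
  simp [tableMap, List.map_const']

theorem map_getD_range_self (l : List Int) :
    (List.range l.length).map (fun i => l.getD i 0) = l := by
  apply List.ext_getElem (by simp)
  intro i h1 h2
  simp only [List.length_map, List.length_range] at h1
  simp [List.getElem?_eq_getElem h2]

-- A computes the factor-by-factor product once it has at least two roots
theorem a_eq_polyk (R : List Int) (h2 : 2 ≤ R.length) :
    polynomeEqGenerator R = polyk R R.length := by
  show (List.range (R.length+1)).foldl (fun C i => C ++
      [pvG2 ((List.range (R.length+1)).foldl (pvOuter R)
        ((List.range (R.length+1)).foldl (fun c _ =>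
          c ++ [(List.range (R.length+1)).foldl (fun cl _ => cl ++ [(0:Int)]) []]) []))
        R.length i]) [] = polyk R R.length
  rw [c0_eq R, outer_loop R (R.length+1) (le_refl _)]
  rw [PySem.List.foldl_append_singleton_eq_map
    (fun i => pvG2 (tableMap R (R.length+1)) R.length i)]
  rw [List.nil_append]
  have hmap : ∀ i, pvG2 (tableMap R (R.length+1)) R.length i = (rowSpec R R.length).getD i 0 := by
    intro i
    unfold tableMap
    rw [pvG2_map_range _ _ _ _ (by omega)]
    simp
  rw [List.map_congr_left (fun i _ => hmap i)]
  have hr : rowSpec R R.length = polyk R R.length := by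
    unfold rowSpec
    rw [if_neg (by omega)]
    simp
  conv_lhs => rw [show R.length + 1 = (rowSpec R R.length).length from
    (rowSpec_length R R.length (le_refl _)).symm]
  rw [map_getD_range_self, hr]

-- ===== B-side: convolution = polynomial multiplication, via Polynomial ℤ =====

noncomputable def toPoly (l : List Int) : Polynomial Int :=
  ∑ i ∈ Finset.range l.length, Polynomial.C (l.getD i 0) * Polynomial.X ^ i

theorem coeff_toPoly (l : List Int) (k : Nat) : (toPoly l).coeff k = l.getD k 0 := by
  unfold toPoly
  rw [Polynomial.finset_sum_coeff]
  simp only [Polynomial.coeff_C_mul, Polynomial.coeff_X_pow, mul_ite, mul_one, mul_zero]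
  rw [Finset.sum_ite_eq (Finset.range l.length) k (fun i => l.getD i 0)]
  by_cases h : k < l.length
  · simp [h]
  · simp [h, List.getD_eq_getElem?_getD]

theorem getD_set (l : List Int) (k m : Nat) (v : Int) (h : k < l.length) :
    (l.set k v).getD m 0 = if m = k then v else l.getD m 0 := by
  by_cases hm : m < l.length
  · rw [List.getD_eq_getElem _ _ (by simpa using hm), List.getElem_set]
    split_ifs with h1 h2 h3
    · rfl
    · exact absurd h1.symm h2
    · exact absurd h3.symm h1
    · exact (List.getD_eq_getElem _ _ hm).symm
  · rw [if_neg (by omega), List.getD_eq_getElem?_getD, List.getD_eq_getElem?_getD,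
      List.getElem?_eq_none (by simpa using hm), List.getElem?_eq_none (by omega)]

theorem getD_beyond (l : List Int) (k : Nat) (h : l.length ≤ k) : l.getD k 0 = 0 := by
  rw [List.getD_eq_getElem?_getD, List.getElem?_eq_none (by omega)]
  rfl

theorem list_eq_of_toPoly (l l' : List Int) (hlen : l.length = l'.length)
    (hp : toPoly l = toPoly l') : l = l' := by
  apply List.ext_getElem hlen
  intro i h1 h2
  have := congrArg (fun p => Polynomial.coeff p i) hp
  simp only [coeff_toPoly] at this
  rwa [List.getD_eq_getElem _ _ h1, List.getD_eq_getElem _ _ h2] at this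

theorem toPoly_set_add (l : List Int) (k : Nat) (v : Int) (h : k < l.length) :
    toPoly (l.set k (l.getD k 0 + v)) = toPoly l + Polynomial.C v * Polynomial.X ^ k := by
  apply Polynomial.ext
  intro m
  rw [Polynomial.coeff_add, coeff_toPoly, coeff_toPoly]
  rw [getD_set l k m _ h, Polynomial.coeff_C_mul, Polynomial.coeff_X_pow]
  by_cases hm : m = k
  · subst hm; simp
  · simp [hm]

theorem toPoly_replicate (n : Nat) : toPoly (List.replicate n (0:Int)) = 0 := by
  unfold toPoly
  apply Finset.sum_eq_zero
  intro i _
  rw [getD_replicate_zero]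
  simp

theorem sum_factor (P Q : List Int) (i : Nat) :
    ∑ j ∈ Finset.range Q.length,
        Polynomial.C (P.getD i 0 * Q.getD j 0) * Polynomial.X ^ (i+j)
      = Polynomial.C (P.getD i 0) * Polynomial.X ^ i * toPoly Q := by
  unfold toPoly
  rw [Finset.mul_sum]
  apply Finset.sum_congr rfl
  intro j _
  rw [map_mul, pow_add]
  ring

theorem conv_inner (P Q : List Int) (i : Nat) (hi : i < P.length) :
    ∀ (m : Nat) (out : List Int), m ≤ Q.length → out.length = P.length + Q.length - 1 →
      ((List.range m).foldl (fun out j =>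
        out.set (i+j) (out.getD (i+j) 0 + P.getD i 0 * Q.getD j 0)) out).length = out.length ∧
      toPoly ((List.range m).foldl (fun out j =>
        out.set (i+j) (out.getD (i+j) 0 + P.getD i 0 * Q.getD j 0)) out)
        = toPoly out + ∑ j ∈ Finset.range m,
            Polynomial.C (P.getD i 0 * Q.getD j 0) * Polynomial.X ^ (i+j) := by
  intro m
  induction m with
  | zero => intro out _ _; simp
  | succ n ih =>
    intro out hm hlen
    obtain ⟨ihl, ihp⟩ := ih out (by omega) hlen
    rw [List.range_succ, List.foldl_append, List.foldl_cons, List.foldl_nil]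
    set res := (List.range n).foldl (fun out j =>
      out.set (i+j) (out.getD (i+j) 0 + P.getD i 0 * Q.getD j 0)) out with hres
    have hin : i + n < res.length := by rw [ihl, hlen]; omega
    constructor
    · rw [List.length_set, ihl]
    · rw [toPoly_set_add res (i+n) _ hin, ihp, Finset.sum_range_succ]
      ring

theorem conv_outer (P Q : List Int) :
    ∀ (m : Nat) (out : List Int), m ≤ P.length → out.length = P.length + Q.length - 1 →
      ((List.range m).foldl (fun out i =>
        (List.range Q.length).foldl (fun out j =>
          out.set (i+j) (out.getD (i+j) 0 + P.getD i 0 * Q.getD j 0)) out) out).length = out.length ∧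
      toPoly ((List.range m).foldl (fun out i =>
        (List.range Q.length).foldl (fun out j =>
          out.set (i+j) (out.getD (i+j) 0 + P.getD i 0 * Q.getD j 0)) out) out)
        = toPoly out + (∑ i ∈ Finset.range m, Polynomial.C (P.getD i 0) * Polynomial.X ^ i) * toPoly Q := by
  intro m
  induction m with
  | zero => intro out _ _; simp
  | succ n ih =>
    intro out hm hlen
    obtain ⟨ihl, ihp⟩ := ih out (by omega) hlen
    rw [List.range_succ, List.foldl_append, List.foldl_cons, List.foldl_nil]
    set res := (List.range n).foldl (fun out i =>
      (List.range Q.length).foldl (fun out j =>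
        out.set (i+j) (out.getD (i+j) 0 + P.getD i 0 * Q.getD j 0)) out) out with hres
    obtain ⟨hl2, hp2⟩ := conv_inner P Q n (by omega) Q.length res (le_refl _) (by rw [ihl, hlen])
    constructor
    · rw [hl2, ihl]
    · rw [hp2, ihp, sum_factor, Finset.sum_range_succ]
      ring

theorem toPoly_pvConv (P Q : List Int) :
    (pvConv P Q).length = P.length + Q.length - 1 ∧
      toPoly (pvConv P Q) = toPoly P * toPoly Q := by
  obtain ⟨hl, hp⟩ := conv_outer P Q P.length (List.replicate (P.length + Q.length - 1) 0)
    (le_refl _) (by simp)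
  refine ⟨by rw [pvConv, hl]; simp, ?_⟩
  rw [pvConv] at *
  rw [hp, toPoly_replicate]
  unfold toPoly
  ring

theorem toPoly_pvStep (r : Int) (C : List Int) (hC : C ≠ [])
    (hm : C.getD (C.length - 1) 0 = 1) :
    toPoly (pvStep r C) = (Polynomial.X - Polynomial.C r) * toPoly C := by
  have hpos := List.length_pos_iff.mpr hC
  apply Polynomial.ext
  intro k
  rw [coeff_toPoly, sub_mul, Polynomial.coeff_sub, Polynomial.coeff_C_mul, coeff_toPoly]
  match k with
  | 0 =>
    rw [Polynomial.coeff_X_mul_zero, pvStep_getD_zero]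
    ring
  | k+1 =>
    rw [Polynomial.coeff_X_mul, coeff_toPoly]
    rcases Nat.lt_or_ge (k+1) C.length with h | h
    · rw [pvStep_getD_mid r C (k+1) (by omega) h]
      simp
    · rcases Nat.eq_or_lt_of_le h with h | h
      · rw [show k+1 = C.length by omega, pvStep_getD_top r C hC,
          getD_beyond C C.length (le_refl _), show k = C.length - 1 by omega, hm]
        ring
      · rw [getD_beyond (pvStep r C) (k+1) (by rw [pvStep_length r C hC]; omega),
          getD_beyond C (k+1) (by omega), getD_beyond C k (by omega)]
        ring

theorem toPoly_polyk (R : List Int) (n : Nat) (hn : n ≤ R.length) :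
    toPoly (polyk R n)
      = ((R.take n).map (fun r => Polynomial.X - Polynomial.C r)).prod := by
  induction n with
  | zero => simp [polyk, toPoly]
  | succ m ih =>
    have hmon : (polyk R m).getD ((polyk R m).length - 1) 0 = 1 := by
      rw [polyk_length R m (by omega)]
      simpa using polyk_getD_self R m (by omega)
    rw [polyk_succ R m (by omega),
      toPoly_pvStep _ _ (polyk_ne_nil R m (by omega)) hmon, ih (by omega),
      List.take_add_one, List.getElem?_eq_getElem (by omega : m < R.length)]
    simp only [Option.toList_some, List.map_append, List.prod_append, List.map_cons,
      List.map_nil, List.prod_cons, List.prod_nil, mul_one]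
    rw [List.getD_eq_getElem _ _ (by omega : m < R.length)]
    ring

theorem pvBuildF_spec (fuel : Nat) :
    ∀ (R : List Int), R.length ≤ fuel →
      (pvBuildF fuel R).length = R.length + 1 ∧
      toPoly (pvBuildF fuel R)
        = (R.map (fun r => Polynomial.X - Polynomial.C r)).prod := by
  induction fuel with
  | zero =>
    intro R hR
    have : R = [] := List.length_eq_zero_iff.mp (by omega)
    subst this
    refine ⟨rfl, ?_⟩
    simp [pvBuildF, toPoly]
  | succ f ih =>
    intro R hR
    rcases Nat.lt_or_ge R.length 2 with h2 | h2
    · interval_cases hl : R.length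
      · have : R = [] := List.length_eq_zero_iff.mp hl
        subst this
        refine ⟨rfl, ?_⟩
        simp [pvBuildF, toPoly]
      · obtain ⟨r, hr⟩ : ∃ r, R = [r] := by
          match R, hl with
          | [r], _ => exact ⟨r, rfl⟩
        subst hr
        refine ⟨rfl, ?_⟩
        show toPoly [-r, 1] = _
        unfold toPoly
        simp [Finset.sum_range_succ]
        ring
    · have hstep : pvBuildF (f+1) R
          = pvConv (pvBuildF f (R.take (R.length / 2))) (pvBuildF f (R.drop (R.length / 2))) := by
        rw [pvBuildF]
        rw [if_neg (by omega), if_neg (by omega)]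
      have htl : (R.take (R.length / 2)).length = R.length / 2 := by simp; omega
      have hdl : (R.drop (R.length / 2)).length = R.length - R.length / 2 := by simp
      obtain ⟨ihl1, ihp1⟩ := ih (R.take (R.length / 2)) (by omega)
      obtain ⟨ihl2, ihp2⟩ := ih (R.drop (R.length / 2)) (by omega)
      obtain ⟨hcl, hcp⟩ := toPoly_pvConv (pvBuildF f (R.take (R.length / 2)))
        (pvBuildF f (R.drop (R.length / 2)))
      constructor
      · rw [hstep, hcl, ihl1, ihl2, htl, hdl]; omega
      · rw [hstep, hcp, ihp1, ihp2, ← List.prod_append, ← List.map_append,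
          List.take_append_drop]

theorem polyk_full (R : List Int) : polyk R R.length = polynomeEqGenerator_alt R := by
  have hB := pvBuildF_spec R.length R (le_refl _)
  apply list_eq_of_toPoly
  · rw [polyk_length R R.length (le_refl _)]
    unfold polynomeEqGenerator_alt
    omega
  · rw [toPoly_polyk R R.length (le_refl _), List.take_length]
    unfold polynomeEqGenerator_alt
    rw [hB.2]

-- ===== VERDICT (by name: the statement is the Claim_ definition above) =====
theorem polynomeEqGenerator_spec : Claim_unchanged_polynomeEqGenerator := by
  intro R _ hD
  unfold D_polynomeEqGenerator at hD
  rw [a_eq_polyk R (by omega), polyk_full R]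

theorem polynomeEqGenerator_changed : Claim_changed_polynomeEqGenerator := by
  unfold Claim_changed_polynomeEqGenerator
  refine ⟨by decide, by decide, by decide, ?_, by decide⟩
  decide

theorem polynomeEqGenerator_tight : Claim_exact_polynomeEqGenerator := by
  intro R _ hD h
  unfold D_polynomeEqGenerator at hD
  match R, hD with
  | [], _ => exact absurd h (by decide)
  | [r], _ =>
    have := congrArg (fun L => L.getD 1 0) h
    simp [polynomeEqGenerator, polynomeEqGenerator_alt, pvBuildF, pvS2, pvG2,
      pvOuter, pvInner, List.range_succ] at this
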